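-- pv_equiv track=rewrite | github.com/mkarampatsis/thancad-dockerize | app/p_ggen/gen.py | iterby3
-- ===== SOURCE A (Python) =====
-- def iterby3(iterable):
--     """Returns triples of consecutive elements of iterable (non exclusive).
--
--     For example: by3((1, 3, 7, -5, 'a')) returns:
--     (1,3,7) then (3,7,-5) then (7,-5,'a')
--     """
--     it = iter(iterable)
--     try:          #Thanasis2024:05_02: This raises StopIteration and PEP 479 (2023) will cause a runtime error
--         val1 = next(it)
--         val2 = next(it)
--     except StopIteration:
--         return    #Thanasis2024:05_02: workaround to end generator if iterable contains no elements.
--     for val3 in it: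
--         yield val1, val2, val3
--         val1 = val2
--         val2 = val3
-- ===== SOURCE B (Python) =====
-- from itertools import tee
--
-- def iterby3(iterable):
--     a, b, c = tee(iterable, 3)
--     next(b, None)
--     next(c, None)
--     next(c, None)
--     yield from zip(a, b, c)
-- ===== Notes on version B (the rewrite author's own statement) =====
-- stated objective: idiomatic
-- what changed: Replaced the manual two-variable sliding window with three tee'd iterators staggered by next(..., None) and zipped together, yielding the same consecutive triples lazily.
import Mathlib
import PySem

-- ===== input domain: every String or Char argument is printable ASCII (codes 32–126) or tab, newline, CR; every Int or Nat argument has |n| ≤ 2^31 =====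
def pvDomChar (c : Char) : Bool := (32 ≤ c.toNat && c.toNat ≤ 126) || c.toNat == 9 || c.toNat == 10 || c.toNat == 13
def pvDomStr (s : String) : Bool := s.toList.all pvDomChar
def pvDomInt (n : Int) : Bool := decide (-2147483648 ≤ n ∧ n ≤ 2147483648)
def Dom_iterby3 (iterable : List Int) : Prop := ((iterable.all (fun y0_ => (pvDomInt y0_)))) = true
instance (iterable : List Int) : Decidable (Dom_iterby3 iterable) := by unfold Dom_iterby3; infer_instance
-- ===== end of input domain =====

-- B replaces A's manual two-variable sliding window by three tee'd, staggered iterators zipped together (idiomatic; same cost).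


-- ===== PORT A =====
-- loop: for val3 in it: yield (val1,val2,val3); val1=val2; val2=val3
def iterby3Loop (val1 val2 : Int) : List Int → List (Int × Int × Int)
  | [] => []
  | val3 :: it => (val1, val2, val3) :: iterby3Loop val2 val3 it

-- A: take the first two elements (return [] if fewer), then slide the window over the rest
def iterby3 (iterable : List Int) : List (Int × Int × Int) :=
  match iterable with
  | val1 :: val2 :: it => iterby3Loop val1 val2 it
  | _ => []

-- ===== PORT B =====
-- B: zip the list with its drop-1 and drop-2 copies (tee + staggered next + zip)
def iterby3_alt (iterable : List Int) : List (Int × Int × Int) :=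
  iterable.zip ((iterable.drop 1).zip (iterable.drop 2))

-- ===== PRECONDITION & SPEC =====
def Spec_iterby3 (iterable : List Int) (out : List (Int × Int × Int)) : Prop := out = iterby3_alt iterable
instance (iterable : List Int) (out : List (Int × Int × Int)) : Decidable (Spec_iterby3 iterable out) := by unfold Spec_iterby3; infer_instance

-- ===== CLAIM (what is proved, stated in full; the proofs are below) =====
def Claim_equal_iterby3 : Prop := ∀ (iterable : List Int), Dom_iterby3 iterable → Spec_iterby3 iterable (iterby3 iterable)

-- ===== LEMMAS AND PROOFS =====

theorem loop_eq_zip (val1 val2 : Int) (it : List Int) :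
    iterby3Loop val1 val2 it =
      (val1 :: val2 :: it).zip ((val2 :: it).zip it) := by
  induction it generalizing val1 val2 with
  | nil => rfl
  | cons v3 rest ih => simp [iterby3Loop, ih, List.zip]

-- ===== VERDICT (by name: the statement is the Claim_ definition above) =====
theorem iterby3_spec : Claim_equal_iterby3 := by
  intro iterable _
  unfold Spec_iterby3 iterby3 iterby3_alt
  match iterable with
  | [] => rfl
  | [a] => rfl
  | a :: b :: it => simpa using loop_eq_zip a b it
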